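-- pv_equiv track=rewrite | github.com/neimandavid/traffic-routing | surtrac_test/intersectionGeneratorBlocks.py | dataAugmenter
-- ===== SOURCE A (Python) =====
-- import itertools
--
-- def dataAugmenter(lanelist):
--     #Given a list of "road_lane" strings, want all reorderings, where we can change the order the roads appear and change the order within each road that the lanes appear
--     #First, split to sublists by road
--     listlist = []
--     curRoad = None
--     for lane in lanelist:
--         if lane.split("_")[0] == curRoad:
--             listlist[-1].append(lane)
--         else:
--             curRoad = lane.split("_")[0]
--             listlist.append([lane])
--     listlistlist = makeListListList(listlist)
--     l3new = []
--     for listlist in listlistlist: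
--         perms = itertools.permutations(listlist)
--         for perm in perms:
--             catlist = []
--             for sublist in perm:
--                 catlist += sublist
--             l3new.append(catlist)
--     return l3new
--
-- def makeListListList(listlist):
--     if len(listlist) == 0:
--         return [[]] #TODO Check format here
--     else:
--         listlistlist = []
--         perms = list(itertools.permutations(listlist[0]))
--         if len(listlist) == 1:
--             #Ex:
--             #ll = [[1,2]]
--             #perms = [[1,2],[2,1]]
--             #Just return perms?
--             #Think I'm missing some brackets: return [ [[1,2]], [[2,1]] ]
--             #since I want a list of listlists
--             for perm in perms:
--                 listlistlist.append([list(perm)])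
--         else:
--             #Build stuff recursively. Ex:
--             #ll = [[1,2], [3, 4]]
--             #perms = [[1,2], [2,1]]
--             #Take each thing in perms, and concat all the stuff from ll[1:]
--             #lll = [[[1,2], [3, 4]], [[1,2],[4,3]], [[2,1],[3,4]], [[2,1],[4,3]]]
--             for perm in perms:
--                 for utation in makeListListList(listlist[1:]):
--                     listlistlist.append([list(perm)]+utation)
--         return listlistlist
-- ===== SOURCE B (Python) =====
-- import itertools
--
-- def dataAugmenter(lanelist):
--     # Group consecutive lanes by road prefix, then enumerate every choice of
--     # per-road internal ordering (cartesian product, first road varying slowest)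
--     # and, for each choice, every ordering of the roads, concatenating.
--     groups = [list(g) for _, g in itertools.groupby(lanelist, key=lambda s: s.split("_")[0])]
--     internal = [list(itertools.permutations(g)) for g in groups]
--     out = []
--     for config in itertools.product(*internal):
--         for perm in itertools.permutations(config):
--             out.append([lane for sub in perm for lane in sub])
--     return out
-- ===== Notes on version B (the rewrite author's own statement) =====
-- stated objective: simpler
-- what changed: Replaces the hand-written grouping loop and the recursive makeListListList helper with itertools.groupby and itertools.product over precomputed per-road permutation lists, keeping the exact enumeration order.
import Mathlib
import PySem

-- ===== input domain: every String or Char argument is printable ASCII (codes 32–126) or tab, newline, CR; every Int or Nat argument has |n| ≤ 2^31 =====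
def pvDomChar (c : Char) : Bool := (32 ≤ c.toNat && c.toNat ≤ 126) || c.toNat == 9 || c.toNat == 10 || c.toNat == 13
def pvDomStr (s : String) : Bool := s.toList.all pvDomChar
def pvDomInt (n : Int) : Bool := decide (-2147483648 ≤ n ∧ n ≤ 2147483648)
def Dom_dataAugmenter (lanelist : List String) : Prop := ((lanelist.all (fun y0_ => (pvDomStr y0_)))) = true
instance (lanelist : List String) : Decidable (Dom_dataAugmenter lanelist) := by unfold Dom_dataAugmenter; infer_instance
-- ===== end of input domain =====

-- B replaces A's hand-written grouping loop and recursive makeListListList helper by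
-- groupby-style chunking and a generic cartesian product over precomputed per-road
-- permutation lists (objective: simpler; same enumeration order and cost).

-- shared helper: itertools.permutations in CPython's enumeration order
-- lane.split("_")[0] (split on "_" is never empty, so [0] never raises)
def pvRoad (s : String) : String := (((PySem.Str.split? s "_").getD []).headD "")

-- all ways to pick one element (in order) together with the remaining list
def pvPicks {α : Type} : List α → List (α × List α)
  | [] => []
  | x :: xs => (x, xs) :: (pvPicks xs).map (fun p => (p.1, x :: p.2))

-- itertools.permutations, fuelled by the length (fuel is always sufficient)
def pvPermsAux {α : Type} : Nat → List α → List (List α)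
  | _, [] => [[]]
  | 0, _ :: _ => []
  | n+1, x :: xs => (pvPicks (x :: xs)).flatMap (fun p => (pvPermsAux n p.2).map (p.1 :: ·))

def pvPerms {α : Type} (xs : List α) : List (List α) := pvPermsAux xs.length xs

-- ===== PORT A =====
-- listlist[-1].append(lane)  (the [] case is unreachable in A: the first iteration takes the else branch)
def pvAppendLast (ll : List (List String)) (x : String) : List (List String) :=
  match ll with
  | [] => []
  | [g] => [g ++ [x]]
  | g :: h :: t => g :: pvAppendLast (h :: t) x

-- the body of A's grouping for-loop; state = (listlist, curRoad)
def pvStepA (st : List (List String) × Option String) (lane : String) :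
    List (List String) × Option String :=
  if some (pvRoad lane) = st.2 then (pvAppendLast st.1 lane, st.2)
  else (st.1 ++ [[lane]], some (pvRoad lane))

def pvGroupA (lanelist : List String) : List (List String) :=
  (lanelist.foldl pvStepA (([] : List (List String)), (none : Option String))).1

-- A's recursive makeListListList
def pvMkLLL : List (List String) → List (List (List String))
  | [] => [[]]
  | [g] => (pvPerms g).map (fun p => [p])
  | g :: h :: t => (pvPerms g).flatMap (fun p => (pvMkLLL (h :: t)).map (fun u => p :: u))

def dataAugmenter (lanelist : List String) : List (List String) :=
  (pvMkLLL (pvGroupA lanelist)).flatMap (fun ll =>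
    (pvPerms ll).map (fun perm => perm.foldl (fun catlist sublist => catlist ++ sublist) []))

-- ===== PORT B =====
-- itertools.groupby chunking: the leading run of lanes with road k, and the rest
def pvChunk (k : String) : List String → List String × List String
  | [] => ([], [])
  | y :: ys =>
    if pvRoad y = k then
      (y :: (pvChunk k ys).1, (pvChunk k ys).2)
    else ([], y :: ys)

theorem pvChunk_snd_length (k : String) (ys : List String) :
    (pvChunk k ys).2.length ≤ ys.length := by
  induction ys with
  | nil => simp [pvChunk]
  | cons y ys ih => simp only [pvChunk]; split <;> simp; omega

def pvGroupB : List String → List (List String)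
  | [] => []
  | x :: xs => (x :: (pvChunk (pvRoad x) xs).1) :: pvGroupB (pvChunk (pvRoad x) xs).2
termination_by l => l.length
decreasing_by exact Nat.lt_succ_of_le (pvChunk_snd_length _ _)

-- itertools.product, first factor varying slowest
def pvProd {α : Type} : List (List α) → List (List α)
  | [] => [[]]
  | ps :: rest => ps.flatMap (fun p => (pvProd rest).map (p :: ·))

def dataAugmenter_alt (lanelist : List String) : List (List String) :=
  let groups := pvGroupB lanelist
  let internal := groups.map pvPerms
  (pvProd internal).flatMap (fun config =>
    (pvPerms config).map (fun perm => perm.flatten))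

-- ===== PRECONDITION & SPEC =====
def Spec_dataAugmenter (lanelist : List String) (out : List (List String)) : Prop := out = dataAugmenter_alt lanelist
instance (lanelist : List String) (out : List (List String)) : Decidable (Spec_dataAugmenter lanelist out) := by unfold Spec_dataAugmenter; infer_instance

-- ===== CLAIM (what is proved, stated in full; the proofs are below) =====
def Claim_equal_dataAugmenter : Prop := ∀ (lanelist : List String), Dom_dataAugmenter lanelist → Spec_dataAugmenter lanelist (dataAugmenter lanelist)

-- ===== LEMMAS AND PROOFS =====

theorem pvAppendLast_append (done : List (List String)) (cur : List String) (x : String) :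
    pvAppendLast (done ++ [cur]) x = done ++ [cur ++ [x]] := by
  induction done with
  | nil => rfl
  | cons d ds ih =>
    cases ds with
    | nil => rfl
    | cons e es =>
      simp only [List.cons_append] at ih ⊢
      rw [pvAppendLast]
      · exact congrArg (d :: ·) ih

theorem pvGroupA_loop (ys : List String) :
    ∀ (done : List (List String)) (cur : List String) (k : String),
      (ys.foldl pvStepA (done ++ [cur], some k)).1
        = done ++ (cur ++ (pvChunk k ys).1) :: pvGroupB (pvChunk k ys).2 := by
  induction ys with
  | nil => intro done cur k; simp [pvChunk, pvGroupB]
  | cons y ys ih =>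
    intro done cur k
    by_cases h : pvRoad y = k
    · simp only [List.foldl_cons, pvStepA, h, pvAppendLast_append, pvChunk, if_true]
      rw [ih done (cur ++ [y]) k]
      simp
    · have hne : ¬ some (pvRoad y) = some k := by simp [h]
      simp only [List.foldl_cons, pvStepA, if_neg hne, pvChunk, if_neg h]
      have := ih (done ++ [cur]) [y] (pvRoad y)
      rw [this, pvGroupB]
      simp

theorem pvGroupA_eq_pvGroupB (l : List String) : pvGroupA l = pvGroupB l := by
  cases l with
  | nil => simp [pvGroupA, pvGroupB]
  | cons x xs =>
    unfold pvGroupA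
    have h0 : pvStepA ([], none) x = ([[x]], some (pvRoad x)) := by
      simp [pvStepA]
    rw [List.foldl_cons, h0]
    have := pvGroupA_loop xs [] [x] (pvRoad x)
    simp only [List.nil_append] at this
    rw [this, pvGroupB]
    simp

theorem flatMap_singleton_map {α β : Type} (l : List α) (f : α → β) :
    l.flatMap (fun x => [f x]) = l.map f := by
  induction l with
  | nil => rfl
  | cons a l ih => simp [List.flatMap_cons, ih]

theorem pvMkLLL_eq_pvProd (gs : List (List String)) :
    pvMkLLL gs = pvProd (gs.map pvPerms) := by
  induction gs with
  | nil => rfl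
  | cons g rest ih =>
    cases rest with
    | nil =>
      simp only [pvMkLLL, List.map_cons, List.map_nil, pvProd]
      rw [← flatMap_singleton_map (pvPerms g) (fun p => [p])]
    | cons h t =>
      simp only [pvMkLLL, List.map_cons, pvProd, ih]

theorem foldl_append_eq_flatten' (xs : List (List String)) (acc : List String) :
    xs.foldl (fun catlist sublist => catlist ++ sublist) acc = acc ++ xs.flatten := by
  induction xs generalizing acc with
  | nil => simp
  | cons x xs ih => simp [ih]

-- ===== VERDICT (by name: the statement is the Claim_ definition above) =====
theorem dataAugmenter_spec : Claim_equal_dataAugmenter := by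
  intro lanelist _
  unfold Spec_dataAugmenter dataAugmenter dataAugmenter_alt
  rw [pvGroupA_eq_pvGroupB, pvMkLLL_eq_pvProd]
  apply List.flatMap_congr
  intro ll _
  apply List.map_congr_left
  intro perm _
  rw [foldl_append_eq_flatten']
  simp
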